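-- pv_equiv track=rewrite | github.com/hieudoanm/sandbox | packages/python.org/lodash/libs/object.py | omit
-- ===== SOURCE A (Python) =====
-- def keys(obj):
--     """
--     keys
--     """
--     return list(obj.keys())
--
-- def omit(object_var, paths):
--     """
--     omit
--     """
--     new_object = {}
--     _keys = keys(object_var)
--     for key in _keys:
--         if key not in paths:
--             value = object_var[key]
--             new_object[key] = value
--     return new_object
-- ===== SOURCE B (Python) =====
-- def omit(object_var, paths):
--     """
--     omit: copy the dict, then subtract the listed paths.
--     """
--     new_object = dict(object_var)
--     for path in paths:
--         new_object.pop(path, None)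
--     return new_object
-- ===== Notes on version B (the rewrite author's own statement) =====
-- stated objective: faster
-- what changed: B makes one shallow copy of the dict and pops each path from it (traverses paths and subtracts), instead of A's loop over all source keys with a list-membership test per key followed by a re-lookup and insert.
import Mathlib
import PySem

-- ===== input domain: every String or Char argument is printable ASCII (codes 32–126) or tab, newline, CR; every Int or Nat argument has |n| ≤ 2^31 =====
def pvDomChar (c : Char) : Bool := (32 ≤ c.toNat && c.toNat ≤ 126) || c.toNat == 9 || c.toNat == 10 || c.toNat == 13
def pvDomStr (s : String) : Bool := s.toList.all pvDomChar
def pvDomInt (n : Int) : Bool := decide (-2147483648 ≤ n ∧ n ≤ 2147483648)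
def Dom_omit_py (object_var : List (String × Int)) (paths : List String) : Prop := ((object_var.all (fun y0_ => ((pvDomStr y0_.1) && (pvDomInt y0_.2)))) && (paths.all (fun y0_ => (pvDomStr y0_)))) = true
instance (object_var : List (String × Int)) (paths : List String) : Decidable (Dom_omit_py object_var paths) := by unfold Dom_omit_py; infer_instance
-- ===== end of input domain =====

-- B copies the dict once and pops each path from the copy, instead of A's loop over the
-- source keys that re-looks each key up and inserts the ones not listed in paths.

-- ===== PORT A =====
-- keys(obj) = list(obj.keys()); on the association-list encoding of a dict this is the list of keys.
def keys_A (obj : PySem.Dict String Int) : List String := obj.keys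

def omit_py (object_var : List (String × Int)) (paths : List String) : List (String × Int) :=
  -- the dict argument, in the association-list encoding
  let obj := PySem.Dict.mk object_var
  let _keys := keys_A obj
  (_keys.foldl (fun new_object key =>
      if !(paths.contains key) then
        match obj.get? key with               -- value = object_var[key]
        | some value => new_object.insert key value
        | none => new_object                  -- unreachable: key comes from obj.keys()
      else new_object)
    PySem.Dict.empty).items

-- ===== PORT B =====
def omit_py_alt (object_var : List (String × Int)) (paths : List String) : List (String × Int) :=
  -- new_object = dict(object_var): a shallow copy (faithful under Pre_: keys are distinct)
  -- new_object.pop(path, None) removes the key if present; the returned value is discarded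
  (paths.foldl (fun new_object path => new_object.erase path)
    (PySem.Dict.mk object_var)).items

-- ===== PRECONDITION & SPEC =====
-- Pre_ requires the association list to have pairwise-distinct keys: a Python dict cannot
-- contain duplicate keys, so lists with duplicates do not encode any input the Python
-- function ever receives (on such lists the two ports may keep different duplicate entries).
def Pre_omit_py (object_var : List (String × Int)) (paths : List String) : Prop :=
  (object_var.map Prod.fst).Nodup
instance (object_var : List (String × Int)) (paths : List String) : Decidable (Pre_omit_py object_var paths) := by unfold Pre_omit_py; infer_instance

def pvWitness_omit_py : (List (String × Int)) × List String :=
  ([("a", 1), ("b", 2), ("c", 3)], ["b", "z"])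

def Spec_omit_py (object_var : List (String × Int)) (paths : List String) (out : List (String × Int)) : Prop := out = omit_py_alt object_var paths
instance (object_var : List (String × Int)) (paths : List String) (out : List (String × Int)) : Decidable (Spec_omit_py object_var paths out) := by unfold Spec_omit_py; infer_instance

-- ===== CLAIM (what is proved, stated in full; the proofs are below) =====
def Claim_equal_omit_py : Prop := ∀ (object_var : List (String × Int)) (paths : List String), Dom_omit_py object_var paths → Pre_omit_py object_var paths → Spec_omit_py object_var paths (omit_py object_var paths)

-- ===== LEMMAS AND PROOFS =====

-- B's loop: popping every path from a dict filters its items by key.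
theorem b_loop (paths : List String) (d : PySem.Dict String Int) :
    (paths.foldl (fun new_object path => new_object.erase path) d).items
      = d.items.filter (fun p => !(paths.contains p.1)) := by
  induction paths generalizing d with
  | nil => simp
  | cons q qs ih =>
    rw [List.foldl_cons, ih]
    simp only [PySem.Dict.erase, List.filter_filter]
    apply List.filter_congr
    intro p _
    by_cases h : p.1 = q <;> simp [h]

-- A's loop over a list of fresh, pairwise-distinct key/value pairs appends the kept pairs.
theorem a_loop (paths : List String) (l : List (String × Int)) (acc : PySem.Dict String Int)
    (hnd : (l.map Prod.fst).Nodup) (hfresh : ∀ p ∈ l, acc.contains p.1 = false) :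
    (l.foldl (fun new_object p =>
        if !(paths.contains p.1) then new_object.insert p.1 p.2 else new_object) acc).items
      = acc.items ++ l.filter (fun p => !(paths.contains p.1)) := by
  induction l generalizing acc with
  | nil => simp
  | cons p t ih =>
    simp only [List.map_cons, List.nodup_cons, List.mem_map] at hnd
    obtain ⟨hp, hnt⟩ := hnd
    rw [List.foldl_cons]
    by_cases hc : paths.contains p.1 = true
    · have hm : p.1 ∈ paths := by simpa using hc
      rw [if_neg (by rw [hc]; simp), ih _ hnt (fun q hq => hfresh q (List.mem_cons_of_mem _ hq))]
      simp [hm]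
    · have hcf : paths.contains p.1 = false := by
        cases h : paths.contains p.1 <;> simp_all
      have hfr2 : ∀ q ∈ t, (acc.insert p.1 p.2).contains q.1 = false := by
        intro q hq
        rw [PySem.Dict.contains_insert]
        have hne : q.1 ≠ p.1 := fun h => hp ⟨q, hq, h⟩
        simp [hfresh q (List.mem_cons_of_mem _ hq), hne]
      have hm : p.1 ∉ paths := by simpa using hcf
      rw [if_pos (by rw [hcf]; simp), ih _ hnt hfr2, PySem.Dict.items_insert,
        hfresh p List.mem_cons_self]
      simp [hm]

-- with Nodup keys, looking each key of the dict back up yields its own value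
theorem a_eq_filter (object_var : List (String × Int)) (paths : List String)
    (hnd : (object_var.map Prod.fst).Nodup) :
    omit_py object_var paths = object_var.filter (fun p => !(paths.contains p.1)) := by
  unfold omit_py keys_A
  have hkeys : (PySem.Dict.mk object_var).keys = object_var.map Prod.fst := rfl
  simp only [hkeys, List.foldl_map]
  have hfun : (object_var.foldl (fun new_object p =>
        if !(paths.contains p.1) then
          match (PySem.Dict.mk object_var).get? p.1 with
          | some value => new_object.insert p.1 value
          | none => new_object
        else new_object) PySem.Dict.empty)
      = (object_var.foldl (fun new_object p =>
          if !(paths.contains p.1) then new_object.insert p.1 p.2 else new_object)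
        PySem.Dict.empty) := by
    apply PySem.List.foldl_congr_mem
    intro acc p hp
    have hmem : (p.1, p.2) ∈ (PySem.Dict.mk object_var).items := by simpa using hp
    have hk : (PySem.Dict.mk object_var).keys.Nodup := by
      simpa [PySem.Dict.keys] using hnd
    have hget : (PySem.Dict.mk object_var).get? p.1 = some p.2 := by
      first
      | exact PySem.Dict.get?_of_mem_items hmem hk
      | exact PySem.Dict.get?_of_mem_items _ hmem hk
    rw [hget]
  rw [hfun, a_loop paths object_var PySem.Dict.empty hnd (fun p _ => rfl)]
  simp [PySem.Dict.empty]

-- ===== VERDICT (by name: the statement is the Claim_ definition above) =====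
theorem omit_py_spec : Claim_equal_omit_py := by
  intro object_var paths _ hpre
  unfold Spec_omit_py omit_py_alt
  rw [a_eq_filter object_var paths hpre, b_loop]
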